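-- pv_equiv track=rewrite | github.com/Arif-462/python_cousrse | week 1 Introduction to python/Module 04 first assignment/second_question.py | elements_to_remove
-- ===== SOURCE A (Python) =====
-- def elements_to_remove(a):
--
--     count = {}
--     list = []
--     for num in a:
--         count[num] = count.get(num , 0) + 1
--
--     for num, count in count.items():
--         if count == num:
--             continue
--         elif count > num:
--             list.append(count-num)
--         elif count < num:
--             list.append(count)
--     return list
-- ===== SOURCE B (Python) =====
-- def elements_to_remove(a):
--     # Iterative partition: repeatedly peel off the first element of the
--     # remaining work list, count its occurrences there, strip ALL of its
--     # occurrences, and continue until the work list is empty.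
--     result = []
--     work = list(a)
--     while work:
--         x = work[0]
--         c = work.count(x)
--         work = [y for y in work if y != x]
--         if c == x:
--             pass
--         elif c > x:
--             result.append(c - x)
--         else:
--             result.append(c)
--     return result
-- ===== Notes on version B (the rewrite author's own statement) =====
-- stated objective: alternative
-- what changed: B is an iterative partition: a while loop repeatedly peels the first element of a shrinking work list, counts it there, strips all of its occurrences, and emits the branch result immediately, so there is no frequency dict, no items() scan and no seen/visited bookkeeping; A builds a count table in one pass and then iterates its entries.
import Mathlib
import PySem

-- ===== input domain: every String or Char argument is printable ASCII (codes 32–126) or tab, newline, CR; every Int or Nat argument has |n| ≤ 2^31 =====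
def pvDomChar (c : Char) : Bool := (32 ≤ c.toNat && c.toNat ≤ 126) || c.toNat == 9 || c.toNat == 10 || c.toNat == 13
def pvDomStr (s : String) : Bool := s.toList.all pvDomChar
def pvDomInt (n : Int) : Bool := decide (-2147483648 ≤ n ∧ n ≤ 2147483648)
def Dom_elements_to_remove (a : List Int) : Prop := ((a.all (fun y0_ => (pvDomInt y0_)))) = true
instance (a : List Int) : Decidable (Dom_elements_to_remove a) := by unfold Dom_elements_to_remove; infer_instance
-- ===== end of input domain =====

-- B replaces A's build-a-count-dict-then-scan-its-items with an iterative partition: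
-- a while loop peels the first remaining element, counts it, strips all its occurrences; objective: alternative.

-- ===== PORT A =====
def elements_to_remove (a : List Int) : List Int :=
  -- count = {}; for num in a: count[num] = count.get(num, 0) + 1
  let count := a.foldl (fun d num => d.insert num (d.getD num 0 + 1)) (PySem.Dict.empty : PySem.Dict Int Int)
  -- for num, count in count.items(): …
  count.items.foldl (fun lst p =>
    let num := p.1
    let c := p.2
    if c == num then lst
    else if c > num then lst ++ [c - num]
    else if c < num then lst ++ [c]
    else lst) []

-- ===== PORT B =====
-- Source B's while loop: state (work, result); x = work[0]; c = work.count(x);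
-- work = [y for y in work if y != x]
def elements_to_remove_go : List Int → List Int → List Int
  | [], result => result
  | x :: tl, result =>
    let c : Int := (PySem.List.count (x :: tl) x : Nat)
    let work := (x :: tl).filter (fun y => y ≠ x)
    let result' := if c == x then result else if c > x then result ++ [c - x] else result ++ [c]
    elements_to_remove_go work result'
termination_by work _ => work.length
decreasing_by
  simp only [List.filter_cons, decide_not, ne_eq, List.length_cons]
  exact Nat.lt_succ_of_le (List.length_filter_le _ _)

def elements_to_remove_alt (a : List Int) : List Int :=
  elements_to_remove_go a []

-- ===== PRECONDITION & SPEC =====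
def Spec_elements_to_remove (a : List Int) (out : List Int) : Prop := out = elements_to_remove_alt a
instance (a : List Int) (out : List Int) : Decidable (Spec_elements_to_remove a out) := by unfold Spec_elements_to_remove; infer_instance

-- ===== CLAIM =====
def Claim_equal_elements_to_remove : Prop := ∀ (a : List Int), Dom_elements_to_remove a → Spec_elements_to_remove a (elements_to_remove a)

-- ===== LEMMAS AND PROOFS =====

-- the per-element contribution: [] (skip), [c-num] or [c]
def etrStep (a : List Int) (num : Int) : List Int :=
  let c : Int := (PySem.List.count a num : Nat)
  if c == num then [] else if c > num then [c - num] else [c]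

lemma etrA_spec (a : List Int) :
    elements_to_remove a = (PySem.Set.ofList a).flatMap (etrStep a) := by
  simp only [elements_to_remove, PySem.Dict.foldl_insert_getD_add_one_eq_counter,
    PySem.Dict.items_counter, List.foldl_map]
  have hfun : (fun (lst : List Int) (k : Int) =>
      if ((a.count k : Int)) == k then lst
      else if ((a.count k : Int)) > k then lst ++ [(a.count k : Int) - k]
      else if ((a.count k : Int)) < k then lst ++ [(a.count k : Int)]
      else lst) = fun lst k => lst ++ etrStep a k := by
    funext lst k
    simp only [etrStep, PySem.List.count_eq]
    split_ifs with h1 h2 h3 <;> simp_all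
    omega
  simp only [hfun]
  rw [PySem.List.foldl_append_eq_flatMap]
  simp

-- the first-occurrence sublist a Set.add fold discovers beyond `seen`
def etrNews (seen : List Int) : List Int → List Int
  | [] => []
  | x :: rest => if seen.contains x then etrNews seen rest else x :: etrNews (seen ++ [x]) rest

lemma etrNews_spec (l seen : List Int) :
    seen ++ etrNews seen l = l.foldl PySem.Set.add seen := by
  induction l generalizing seen with
  | nil => simp [etrNews]
  | cons x rest ih =>
    simp only [etrNews, List.foldl_cons]
    by_cases h : seen.contains x
    · simp [PySem.Set.add, PySem.Set.contains, List.contains_iff_mem.mp h, ih]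
    · rw [if_neg h]
      have : PySem.Set.add seen x = seen ++ [x] := by
        simp [PySem.Set.add, PySem.Set.contains]
        intro hmem
        exact absurd (List.contains_iff_mem.mpr hmem) h
      rw [this, ← ih (seen ++ [x])]
      simp

-- etrNews depends on `seen` only through membership of the scanned elements
lemma etrNews_congr (l : List Int) : ∀ s t : List Int,
    (∀ y ∈ l, (y ∈ s ↔ y ∈ t)) → etrNews s l = etrNews t l := by
  induction l with
  | nil => intro s t _; rfl
  | cons x rest ih =>
    intro s t h
    have hx := h x (by simp)
    simp only [etrNews, List.contains_iff_mem]
    by_cases hs : x ∈ s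
    · rw [if_pos hs, if_pos (hx.mp hs)]
      exact ih s t (fun y hy => h y (by simp [hy]))
    · have ht : x ∉ t := fun c => hs (hx.mpr c)
      rw [if_neg hs, if_neg ht]
      exact congrArg _ (ih (s ++ [x]) (t ++ [x])
        (fun y hy => by simp [h y (by simp [hy])]))

-- occurrences of an already-seen value can be filtered out without changing etrNews
lemma etrNews_filter (l : List Int) (x : Int) : ∀ s : List Int, x ∈ s →
    etrNews s l = etrNews s (l.filter (fun y => y ≠ x)) := by
  induction l with
  | nil => intro s _; rfl
  | cons y rest ih =>
    intro s hx
    by_cases h : y = x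
    · subst h
      rw [List.filter_cons_of_neg (by simp)]
      rw [etrNews, if_pos (List.contains_iff_mem.mpr hx)]
      exact ih s hx
    · simp only [List.filter_cons, ne_eq, h, not_false_eq_true, decide_true, if_true]
      simp only [etrNews]
      by_cases hs : y ∈ s
      · rw [if_pos (List.contains_iff_mem.mpr hs), if_pos (List.contains_iff_mem.mpr hs)]
        exact ih s hx
      · rw [if_neg (by simpa using hs), if_neg (by simpa using hs)]
        exact congrArg _ (ih (s ++ [y]) (by simp [hx]))

lemma ofList_cons_filter (x : Int) (l : List Int) :
    PySem.Set.ofList (x :: l) = x :: PySem.Set.ofList (l.filter (fun y => y ≠ x)) := by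
  rw [PySem.Set.ofList_eq_foldl, PySem.Set.ofList_eq_foldl]
  rw [← etrNews_spec, ← etrNews_spec]
  simp only [List.nil_append]
  rw [etrNews, if_neg (by simp)]
  simp only [List.nil_append]
  have h1 : etrNews [x] l = etrNews [x] (l.filter (fun y => y ≠ x)) :=
    etrNews_filter l x [x] (by simp)
  have h2 : etrNews [x] (l.filter (fun y => y ≠ x)) = etrNews [] (l.filter (fun y => y ≠ x)) := by
    refine etrNews_congr _ [x] [] (fun y hy => ?_)
    have : y ≠ x := by simpa using (List.of_mem_filter hy)
    simp [this]
  rw [h1, h2]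

lemma flatMap_congr_mem {α β : Type} (l : List α) (f g : α → List β)
    (h : ∀ y ∈ l, f y = g y) : l.flatMap f = l.flatMap g := by
  induction l with
  | nil => rfl
  | cons x rest ih =>
    simp only [List.flatMap_cons, h x (by simp)]
    rw [ih (fun y hy => h y (by simp [hy]))]

lemma news_sub (l : List Int) : ∀ (seen : List Int) (y : Int), y ∈ etrNews seen l → y ∈ l := by
  induction l with
  | nil => intro _ _ h; simp [etrNews] at h
  | cons x rest ih =>
    intro seen y h
    simp only [etrNews] at h
    split at h
    · exact List.mem_cons_of_mem _ (ih _ _ h)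
    · rcases List.mem_cons.mp h with h | h
      · simp [h]
      · exact List.mem_cons_of_mem _ (ih _ _ h)

lemma etrStep_filter (x y : Int) (tl : List Int) (hy : y ≠ x) :
    etrStep (tl.filter (fun z => z ≠ x)) y = etrStep (x :: tl) y := by
  have : PySem.List.count (tl.filter (fun z => z ≠ x)) y = PySem.List.count (x :: tl) y := by
    simp [PySem.List.count_eq, List.count_filter, hy, Ne.symm hy]
  simp only [etrStep]
  rw [this]

lemma etrB_go_spec (n : Nat) : ∀ (a : List Int), a.length ≤ n → ∀ result : List Int,
    elements_to_remove_go a result = result ++ (PySem.Set.ofList a).flatMap (etrStep a) := by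
  induction n with
  | zero =>
    intro a ha result
    have : a = [] := List.eq_nil_of_length_eq_zero (Nat.le_zero.mp ha)
    subst this; simp [elements_to_remove_go]
  | succ n ihn =>
    intro a ha result
    match a with
    | [] => simp [elements_to_remove_go]
    | x :: tl =>
    rw [elements_to_remove_go]
    have hfil : (x :: tl).filter (fun y => decide (y ≠ x)) = tl.filter (fun y => decide (y ≠ x)) := by
      simp
    have hlen : (tl.filter (fun y => decide (y ≠ x))).length ≤ n :=
      le_trans (List.length_filter_le _ _) (Nat.le_of_succ_le_succ (by simpa using ha))
    have ih' : ∀ r : List Int,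
        elements_to_remove_go (List.filter (fun y => decide (y ≠ x)) tl) r =
          r ++ List.flatMap (etrStep (List.filter (fun y => decide (y ≠ x)) tl))
            (PySem.Set.ofList (List.filter (fun y => decide (y ≠ x)) tl)) :=
      ihn _ hlen
    rw [hfil, ih']
    rw [ofList_cons_filter, List.flatMap_cons]
    have hstep : ∀ y ∈ PySem.Set.ofList (List.filter (fun y => decide (y ≠ x)) tl),
        etrStep (List.filter (fun z => decide (z ≠ x)) tl) y = etrStep (x :: tl) y := by
      intro y hy
      have hmem : y ∈ List.filter (fun z => decide (z ≠ x)) tl := by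
        have h := hy
        rw [PySem.Set.ofList_eq_foldl,
          ← etrNews_spec ((List.filter (fun z => decide (z ≠ x)) tl)) []] at h
        exact news_sub _ _ _ (by simpa using h)
      have hy' : y ≠ x := by simpa using List.of_mem_filter hmem
      exact etrStep_filter x y tl hy'
    rw [flatMap_congr_mem _ _ _ hstep]
    have hres : (if ((PySem.List.count (x :: tl) x : Nat) : Int) == x then result
          else if ((PySem.List.count (x :: tl) x : Nat) : Int) > x then result ++ [((PySem.List.count (x :: tl) x : Nat) : Int) - x]
          else result ++ [((PySem.List.count (x :: tl) x : Nat) : Int)]) = result ++ etrStep (x :: tl) x := by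
      simp only [etrStep]
      split_ifs <;> simp
    rw [hres]
    simp

lemma etrB_spec (a : List Int) :
    elements_to_remove_alt a = (PySem.Set.ofList a).flatMap (etrStep a) := by
  rw [elements_to_remove_alt, etrB_go_spec a.length a (le_refl _)]
  simp

-- ===== VERDICT =====
theorem elements_to_remove_spec : Claim_equal_elements_to_remove := by
  intro a _
  unfold Spec_elements_to_remove
  rw [etrA_spec, etrB_spec]
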